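-- pv_equiv track=rewrite | github.com/arifkhan1990/Competitive-Programming | Codingninjas/Binary Search/Smart Intervals.py | smartInterval
-- ===== SOURCE A (Python) =====
-- def smartInterval(intervals, n):
--     st = [0]*n
--     ed = [0]*n
--     for i in range(n):
--         st[i] = [intervals[i][0], i]
--         ed[i] = [intervals[i][1], i]
--
--     st.sort()
--     ed.sort()
--
--     ans = [-1] * n
--     i, j = 0, 0
--
--     while i < n and j < n:
--         if st[i][0] >= ed[j][0]:
--             idx = ed[j][1]
--             ans[idx] = st[i][1]
--             j += 1
--         else:
--             i += 1
--     return ans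
-- ===== SOURCE B (Python) =====
-- def smartInterval(intervals, n):
--     # sort the (start, index) pairs once; answer each interval's end by a
--     # linear scan for the first pair whose start is >= that end
--     pairs = sorted([intervals[i][0], i] for i in range(n))
--     ans = []
--     for i in range(n):
--         e = intervals[i][1]
--         ans.append(next((idx for s, idx in pairs if s >= e), -1))
--     return ans
-- ===== Notes on version B (the rewrite author's own statement) =====
-- stated objective: simpler
-- what changed: B drops the sorted end-list and the two-pointer sweep entirely: it sorts the (start,index) pairs once and answers each interval independently, in original order, by scanning that sorted list for the first pair whose start is >= the interval's end (-1 if none), so no mutable answer array and no second sort are needed.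
import Mathlib
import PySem

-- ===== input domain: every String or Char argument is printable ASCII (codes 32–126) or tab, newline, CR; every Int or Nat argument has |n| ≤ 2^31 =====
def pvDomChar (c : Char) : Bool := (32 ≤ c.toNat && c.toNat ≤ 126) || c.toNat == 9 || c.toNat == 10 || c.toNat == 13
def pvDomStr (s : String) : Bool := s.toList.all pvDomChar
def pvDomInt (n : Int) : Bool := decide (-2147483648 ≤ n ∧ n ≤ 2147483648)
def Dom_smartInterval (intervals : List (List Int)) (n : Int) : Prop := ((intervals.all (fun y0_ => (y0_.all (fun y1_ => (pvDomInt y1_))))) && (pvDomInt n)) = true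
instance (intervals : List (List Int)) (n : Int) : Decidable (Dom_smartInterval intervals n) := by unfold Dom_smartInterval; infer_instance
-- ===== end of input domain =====

-- B replaces A's two-pointer sweep over the two sorted lists by one sort of the (start, index)
-- pairs plus an independent first-match scan per interval (simpler; no mutable answer array).

-- ===== PORT A =====
-- the for-loop filling st and ed: st[i] = [intervals[i][0], i], ed[i] = [intervals[i][1], i]
def smartInterval_st (intervals : List (List Int)) (n : Int) : List (Int × Int) :=
  (PySem.List.pyRange 0 n 1).map
    (fun i => (PySem.List.pyGetD (PySem.List.pyGetD intervals i []) 0 0, i))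
def smartInterval_ed (intervals : List (List Int)) (n : Int) : List (Int × Int) :=
  (PySem.List.pyRange 0 n 1).map
    (fun i => (PySem.List.pyGetD (PySem.List.pyGetD intervals i []) 1 0, i))

-- the while loop with its two pointers (N = n.toNat: for n < 0 neither `i < n` in Python nor
-- `i < N` here ever holds, so Nat counters bounded by n.toNat are exact)
def smartInterval_sweep (st ed : List (Int × Int)) (N : Nat) (ans : List Int) (i j : Nat) : List Int :=
  if h : i < N ∧ j < N then
    let sp := st.getD i (0, 0)   -- st[i]; in range whenever the Python returns
    let ep := ed.getD j (0, 0)   -- ed[j]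
    if ep.1 ≤ sp.1 then
      smartInterval_sweep st ed N (ans.set ep.2.toNat sp.2) i (j + 1)
    else
      smartInterval_sweep st ed N ans (i + 1) j
  else ans
termination_by (N - i) + (N - j)
decreasing_by all_goals omega

def smartInterval (intervals : List (List Int)) (n : Int) : List Int :=
  let st := PySem.List.sorted2 (smartInterval_st intervals n) (fun p => p.1) (fun p => p.2)
  let ed := PySem.List.sorted2 (smartInterval_ed intervals n) (fun p => p.1) (fun p => p.2)
  smartInterval_sweep st ed n.toNat (List.replicate n.toNat (-1)) 0 0

-- ===== PORT B =====
def smartInterval_alt (intervals : List (List Int)) (n : Int) : List Int :=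
  let pairs := PySem.List.sorted2
    ((PySem.List.pyRange 0 n 1).map
      (fun i => (PySem.List.pyGetD (PySem.List.pyGetD intervals i []) 0 0, i)))
    (fun p => p.1) (fun p => p.2)
  (PySem.List.pyRange 0 n 1).map (fun i =>
    let e := PySem.List.pyGetD (PySem.List.pyGetD intervals i []) 1 0
    match pairs.find? (fun p => decide (e ≤ p.1)) with
    | some p => p.2
    | none => -1)

-- ===== PRECONDITION & SPEC =====
-- A indexes intervals[i][0] and intervals[i][1] for every i in range(n): it raises IndexError
-- unless n ≤ len(intervals) and each of the first n rows has at least 2 entries (n ≤ 0 is fine: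
-- A returns []). Pre_ excludes exactly those raising inputs.
def Pre_smartInterval (intervals : List (List Int)) (n : Int) : Prop :=
  n ≤ intervals.length ∧ ∀ row ∈ intervals.take n.toNat, 2 ≤ row.length
instance (intervals : List (List Int)) (n : Int) : Decidable (Pre_smartInterval intervals n) := by
  unfold Pre_smartInterval; infer_instance
def pvWitness_smartInterval : List (List Int) × Int := ([[1, 3], [2, 5], [3, 4]], 3)

def Spec_smartInterval (intervals : List (List Int)) (n : Int) (out : List Int) : Prop := out = smartInterval_alt intervals n
instance (intervals : List (List Int)) (n : Int) (out : List Int) : Decidable (Spec_smartInterval intervals n out) := by unfold Spec_smartInterval; infer_instance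

-- ===== CLAIM (what is proved, stated in full; the proofs are below) =====
def Claim_equal_smartInterval : Prop := ∀ (intervals : List (List Int)) (n : Int), Dom_smartInterval intervals n → Pre_smartInterval intervals n → Spec_smartInterval intervals n (smartInterval intervals n)

-- ===== LEMMAS AND PROOFS =====


def pvAns (st : List (Int × Int)) (e : Int) : Int :=
  match st.find? (fun p => decide (e ≤ p.1)) with
  | some p => p.2
  | none => -1

def pvApply (st : List (Int × Int)) (ans : List Int) (rem : List (Int × Int)) : List Int :=
  rem.foldl (fun a p =>
    match st.find? (fun q => decide (p.1 ≤ q.1)) with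
    | some q => a.set p.2.toNat q.2
    | none => a) ans

theorem pvApply_cons (st : List (Int × Int)) (ans : List Int) (p : Int × Int) (rem : List (Int × Int)) :
    pvApply st ans (p :: rem)
      = pvApply st (match st.find? (fun q => decide (p.1 ≤ q.1)) with
          | some q => ans.set p.2.toNat q.2
          | none => ans) rem := rfl

theorem pvApply_append (st : List (Int × Int)) (ans : List Int) (l1 l2 : List (Int × Int)) :
    pvApply st ans (l1 ++ l2) = pvApply st (pvApply st ans l1) l2 :=
  List.foldl_append

theorem pvApply_of_none (st : List (Int × Int)) (rem : List (Int × Int))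
    (h : ∀ p ∈ rem, st.find? (fun q => decide (p.1 ≤ q.1)) = none) :
    ∀ ans, pvApply st ans rem = ans := by
  induction rem with
  | nil => intro ans; rfl
  | cons p rem ih =>
    intro ans
    rw [pvApply_cons, h p (by simp)]
    exact ih (fun q hq => h q (by simp [hq])) ans

theorem pvApply_untouched (st : List (Int × Int)) (rem : List (Int × Int)) (p : Nat) :
    ∀ ans, (∀ q ∈ rem, q.2.toNat ≠ p) → (pvApply st ans rem)[p]? = ans[p]? := by
  induction rem with
  | nil => intro ans _; rfl
  | cons q rem ih =>
    intro ans hq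
    rw [pvApply_cons]
    cases hfind : st.find? (fun r => decide (q.1 ≤ r.1)) with
    | none => exact ih ans (fun r hr => hq r (by simp [hr]))
    | some r =>
      rw [ih _ (fun r hr => hq r (by simp [hr]))]
      exact List.getElem?_set_ne (hq q (by simp))

theorem pvApply_length (st : List (Int × Int)) (rem : List (Int × Int)) :
    ∀ ans, (pvApply st ans rem).length = ans.length := by
  induction rem with
  | nil => intro ans; rfl
  | cons q rem ih =>
    intro ans
    rw [pvApply_cons]
    cases hfind : st.find? (fun r => decide (q.1 ≤ r.1)) with
    | none => exact ih ans
    | some r => rw [ih]; simp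

theorem pvApply_hit (st : List (Int × Int)) (l1 l2 : List (Int × Int)) (e : Int) (x : Int)
    (p : Nat) (hx : x.toNat = p) (h1 : ∀ q ∈ l1, q.2.toNat ≠ p) (h2 : ∀ q ∈ l2, q.2.toNat ≠ p)
    (ans : List Int) (hp : p < ans.length) (hinit : ans[p]? = some (-1)) :
    (pvApply st ans (l1 ++ (e, x) :: l2))[p]? = some (pvAns st e) := by
  rw [pvApply_append, pvApply_cons]
  have huntouched : (pvApply st ans l1)[p]? = some (-1) := by
    rw [pvApply_untouched st l1 p ans h1]; exact hinit
  have hlen : p < (pvApply st ans l1).length := by rw [pvApply_length]; exact hp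
  cases hfind : st.find? (fun q => decide (e ≤ q.1)) with
  | none =>
    rw [pvApply_untouched st l2 p _ h2, huntouched]
    simp [pvAns, hfind]
  | some q =>
    rw [pvApply_untouched st l2 p _ h2]
    simp only [hx]
    rw [List.getElem?_set_self hlen]
    simp [pvAns, hfind]

theorem sweep_eq_pvApply (st ed : List (Int × Int)) (N : Nat)
    (hst : st.length = N) (hed : ed.length = N)
    (hsed : List.Pairwise (fun a b => a.1 ≤ b.1) ed) :
    ∀ (m i j : Nat) (ans : List Int) (_hm : (N - i) + (N - j) ≤ m) (hi : i ≤ N) (_hj : j ≤ N),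
      (∀ (k : Nat) (hk : k < i) (hj : j < N),
        (st[k]'(by omega)).1 < (ed[j]'(by omega)).1) →
      smartInterval_sweep st ed N ans i j = pvApply st ans (ed.drop j) := by
  have hedmono : ∀ (a b : Nat) (ha : a ≤ b) (hb : b < ed.length),
      (ed[a]'(by omega)).1 ≤ (ed[b]'hb).1 := by
    intro a b ha hb
    rcases Nat.lt_or_ge a b with h | h
    · exact (List.pairwise_iff_getElem.mp hsed) a b (by omega) hb h
    · have : a = b := by omega
      subst this; rfl
  intro m
  induction m with
  | zero =>
    intro i j ans hm hi hj hinv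
    have hi' : i = N := by omega
    have hj' : j = N := by omega
    subst hi' hj'
    rw [smartInterval_sweep]
    simp [List.drop_of_length_le (le_of_eq hed), pvApply]
  | succ m ih =>
    intro i j ans hm hi hj hinv
    rw [smartInterval_sweep]
    by_cases h : i < N ∧ j < N
    · obtain ⟨hiN, hjN⟩ := h
      rw [dif_pos ⟨hiN, hjN⟩]
      have hiN' : i < st.length := by omega
      have hjN' : j < ed.length := by omega
      simp only [List.getD_eq_getElem st (0,0) hiN', List.getD_eq_getElem ed (0,0) hjN']
      by_cases hcmp : (ed[j]'hjN').1 ≤ (st[i]'hiN').1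
      · rw [if_pos hcmp]
        have hdrop : ed.drop j = (ed[j]'hjN') :: ed.drop (j+1) :=
          List.drop_eq_getElem_cons hjN'
        have hfind : st.find? (fun q => decide ((ed[j]'hjN').1 ≤ q.1)) = some (st[i]'hiN') := by
          rw [List.find?_eq_some_iff_getElem]
          refine ⟨by simpa using hcmp, i, hiN', rfl, ?_⟩
          intro k hk
          simpa using not_le.mpr (hinv k hk hjN)
        rw [hdrop, pvApply_cons, hfind]
        exact ih i (j+1) _ (by omega) (by omega) (by omega)
          (fun k hk hj1 => lt_of_lt_of_le (hinv k hk hjN) (hedmono j (j+1) (by omega) (by omega)))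
      · rw [if_neg hcmp]
        refine ih (i+1) j ans (by omega) (by omega) hj ?_
        intro k hk hjN2
        rcases Nat.lt_or_ge k i with hki | hki
        · exact hinv k hki hjN2
        · have : k = i := by omega
          subst this
          exact not_le.mp hcmp
    · rw [dif_neg h]
      rcases Nat.lt_or_ge j N with hjN | hjN
      · -- i = N
        have hiN : i = N := by omega
        refine (pvApply_of_none st (ed.drop j) ?_ ans).symm
        intro p hp
        rw [List.find?_eq_none]
        intro q hq
        obtain ⟨k, hk, hkq⟩ := List.mem_iff_getElem.mp hq
        obtain ⟨t, ht, htp⟩ := List.mem_iff_getElem.mp hp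
        have hjt : j + t < ed.length := by
          have := List.length_drop (l := ed) (i := j); omega
        have htp' : p = ed[j + t]'hjt := by
          rw [← htp]; rw [List.getElem_drop]
        have h1 : q.1 < (ed[j]'(by omega)).1 := by
          rw [← hkq]; exact hinv k (by omega) (by omega)
        have h2 : (ed[j]'(by omega)).1 ≤ p.1 := by
          rw [htp']; exact hedmono j (j+t) (by omega) hjt
        simp only [decide_eq_true_eq]
        omega
      · -- j = N
        have hj' : j = N := by omega
        subst hj'
        rw [List.drop_of_length_le (le_of_eq hed)]
        rfl

theorem sorted2_eq_sorted_lex (xs : List (Int × Int)) :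
    PySem.List.sorted2 xs (fun p => p.1) (fun p => p.2)
      = PySem.List.sorted xs (fun p => toLex (p.1, p.2)) := by
  unfold PySem.List.sorted2 PySem.List.sorted
  simp only [if_neg (by decide : ¬ (false = true))]
  congr 1
  funext a x
  congr 1
  funext p q
  rcases lt_trichotomy p.1 q.1 with h | h | h
  · simp [Prod.Lex.lt_iff, h]
  · simp [Prod.Lex.lt_iff, h]
  · simp [Prod.Lex.lt_iff, h, not_lt.mpr (le_of_lt h)]
    omega

theorem sorted2_pairwise_fst (xs : List (Int × Int)) :
    List.Pairwise (fun a b => a.1 ≤ b.1)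
      (PySem.List.sorted2 xs (fun p => p.1) (fun p => p.2)) := by
  rw [sorted2_eq_sorted_lex]
  refine (PySem.List.sorted_pairwise xs (fun p => toLex (p.1, p.2))).imp ?_
  intro a b hab
  rcases Prod.Lex.le_iff.mp hab with h | ⟨h, _⟩
  · exact le_of_lt h
  · exact le_of_eq h

theorem smartInterval_eq_alt (intervals : List (List Int)) (n : Int) :
    smartInterval intervals n = smartInterval_alt intervals n := by
  set N := n.toNat with hN
  set st := PySem.List.sorted2 (smartInterval_st intervals n) (fun p => p.1) (fun p => p.2) with hst
  set ed := PySem.List.sorted2 (smartInterval_ed intervals n) (fun p => p.1) (fun p => p.2) with hed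
  have hstlen : st.length = N := by
    rw [hst, (PySem.List.sorted2_perm _ _ _ _).length_eq]
    simp only [smartInterval_st, List.length_map, PySem.List.length_pyRange_one]
    omega
  have hedlen : ed.length = N := by
    rw [hed, (PySem.List.sorted2_perm _ _ _ _).length_eq]
    simp only [smartInterval_ed, List.length_map, PySem.List.length_pyRange_one]
    omega
  have hsed : List.Pairwise (fun a b => a.1 ≤ b.1) ed := sorted2_pairwise_fst _
  have hA : smartInterval intervals n = pvApply st (List.replicate N (-1)) ed := by
    show smartInterval_sweep st ed N (List.replicate N (-1)) 0 0 = _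
    rw [sweep_eq_pvApply st ed N hstlen hedlen hsed (2*N) 0 0 _ (by omega) (by omega) (by omega)
      (by intro k hk _; omega)]
    rfl
  rw [hA]
  have hperm : ed.Perm (smartInterval_ed intervals n) := PySem.List.sorted2_perm _ _ _ _
  have hnodup : (ed.map (fun q => q.2)).Nodup := by
    refine (hperm.map (fun q => q.2)).nodup_iff.mpr ?_
    simpa [smartInterval_ed, List.map_map, Function.comp_def] using
      PySem.List.nodup_pyRange_one 0 n
  have hnonneg : ∀ q ∈ ed, 0 ≤ q.2 := by
    intro q hq
    have : q ∈ smartInterval_ed intervals n := hperm.mem_iff.mp hq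
    simp only [smartInterval_ed, List.mem_map] at this
    obtain ⟨i, hi, rfl⟩ := this
    exact (PySem.List.mem_pyRange_one.mp hi).1
  have hlenB : (smartInterval_alt intervals n).length = N := by
    simp only [smartInterval_alt, List.length_map, PySem.List.length_pyRange_one]
    omega
  refine List.ext_getElem? (fun p => ?_)
  by_cases hp : p < N
  · have hpB : p < (smartInterval_alt intervals n).length := by omega
    have hRB : (smartInterval_alt intervals n)[p]? =
        some (pvAns st (PySem.List.pyGetD (PySem.List.pyGetD intervals (p : Int) []) 1 0)) := by
      rw [List.getElem?_eq_getElem hpB]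
      simp only [smartInterval_alt, List.getElem_map, PySem.List.getElem_pyRange_one]
      rw [show (List.map (fun i => (PySem.List.pyGetD (PySem.List.pyGetD intervals i []) 0 0, i))
            (PySem.List.pyRange 0 n)) = smartInterval_st intervals n from rfl, ← hst]
      simp only [pvAns]
      norm_num
    rw [hRB]
    have hmem : (PySem.List.pyGetD (PySem.List.pyGetD intervals (p : Int) []) 1 0, (p : Int)) ∈ ed := by
      rw [hperm.mem_iff]
      simp only [smartInterval_ed, List.mem_map]
      exact ⟨(p : Int), PySem.List.mem_pyRange_one.mpr ⟨by omega, by omega⟩, rfl⟩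
    obtain ⟨l1, l2, hsplit⟩ := List.append_of_mem hmem
    rw [hsplit] at hnodup hnonneg
    simp only [List.map_append, List.map_cons, List.nodup_append, List.nodup_cons] at hnodup
    have h1 : ∀ q ∈ l1, q.2.toNat ≠ p := by
      intro q hq hqp
      have h0 : (0:Int) ≤ q.2 := hnonneg q (by simp [hq])
      have hq2 : (p : Int) ∈ l1.map (fun r => r.2) := List.mem_map.mpr ⟨q, hq, by omega⟩
      exact hnodup.2.2 _ hq2 _ (by simp) rfl
    have h2 : ∀ q ∈ l2, q.2.toNat ≠ p := by
      intro q hq hqp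
      have h0 : (0:Int) ≤ q.2 := hnonneg q (by simp [hq])
      have hq2 : (p : Int) ∈ l2.map (fun r => r.2) := List.mem_map.mpr ⟨q, hq, by omega⟩
      exact hnodup.2.1.1 hq2
    rw [hsplit]
    exact pvApply_hit st l1 l2 _ (p : Int) p (by simp) h1 h2 (List.replicate N (-1))
      (by simpa using hp) (by rw [List.getElem?_replicate]; simp [hp])
  · rw [List.getElem?_eq_none (l := smartInterval_alt intervals n) (by omega),
      List.getElem?_eq_none]
    rw [pvApply_length]
    simp only [List.length_replicate]
    omega

-- ===== VERDICT (by name: the statement is the Claim_ definition above) =====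
theorem smartInterval_spec : Claim_equal_smartInterval := by
  intro intervals n _ _
  exact smartInterval_eq_alt intervals n
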